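-- pv_equiv track=rewrite | github.com/6210qwe/leetcode_py | leetcode_solutions/by_id/q1336.py | max_product_of_palindromic_substrings
-- ===== SOURCE A (Python) =====
-- from typing import List, Optional
--
-- def manacher(s: str) -> List[int]:
--     n = len(s)
--     s = '#' + '#'.join(s) + '#'
--     p = [0] * (2 * n + 1)
--     center, right = 0, 0
--     for i in range(2 * n + 1):
--         if i < right:
--             p[i] = min(right - i, p[2 * center - i])
--         while i - p[i] - 1 >= 0 and i + p[i] + 1 < 2 * n + 1 and s[i - p[i] - 1] == s[i + p[i] + 1]:
--             p[i] += 1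
--         if i + p[i] > right:
--             center, right = i, i + p[i]
--     return p
--
-- def max_product_of_palindromic_substrings(s: str) -> int:
--     n = len(s)
--     p = manacher(s)
--     max_len_left = [0] * n
--     max_len_right = [0] * n
--
--     # 构建前缀最大值数组
--     for i in range(n):
--         max_len_left[i] = max(max_len_left[i - 1], p[2 * i + 1]) if i > 0 else p[1]
--
--     # 构建后缀最大值数组
--     for i in range(n - 1, -1, -1):
--         max_len_right[i] = max(max_len_right[i + 1], p[2 * i + 1]) if i < n - 1 else p[2 * n - 1]
--
--     # 计算最大乘积
--     max_product = 0
--     for i in range(n - 1):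
--         max_product = max(max_product, max_len_left[i] * max_len_right[i + 1])
--
--     return max_product
-- ===== SOURCE B (Python) =====
-- def max_product_of_palindromic_substrings(s: str) -> int:
--     n = len(s)
--
--     def odd_len(i: int) -> int:
--         l, r = i, i
--         while l - 1 >= 0 and r + 1 < n and s[l - 1] == s[r + 1]:
--             l, r = l - 1, r + 1
--         return r - l + 1
--
--     lens = [odd_len(i) for i in range(n)]
--     suf = [0] * (n + 1)
--     for i in range(n - 1, -1, -1):
--         suf[i] = max(lens[i], suf[i + 1])
--     best = pref = 0
--     for i in range(n - 1):
--         pref = max(pref, lens[i])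
--         best = max(best, pref * suf[i + 1])
--     return best
-- ===== Notes on version B (the rewrite author's own statement) =====
-- stated objective: simpler
-- what changed: Replaces the Manacher (transformed string + mirror/center-right) computation of odd-palindrome lengths by a plain expand-around-center helper, drops the prefix-max array in favour of a running prefix maximum carried through the final product loop, and keeps only the suffix-max array.
import Mathlib
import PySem

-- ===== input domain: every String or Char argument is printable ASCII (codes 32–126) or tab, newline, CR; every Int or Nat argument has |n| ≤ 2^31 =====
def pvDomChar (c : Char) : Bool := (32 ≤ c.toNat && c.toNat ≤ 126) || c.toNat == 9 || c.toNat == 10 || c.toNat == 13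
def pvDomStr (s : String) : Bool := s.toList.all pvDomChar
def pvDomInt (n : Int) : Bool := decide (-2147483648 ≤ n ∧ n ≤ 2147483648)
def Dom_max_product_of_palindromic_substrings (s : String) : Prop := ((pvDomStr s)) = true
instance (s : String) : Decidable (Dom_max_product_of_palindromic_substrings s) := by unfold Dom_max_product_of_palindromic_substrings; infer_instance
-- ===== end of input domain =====

-- B replaces A's Manacher pass by a plain expand-around-center helper and fuses the
-- prefix-max array into a running maximum in the product loop (objective: simpler).

-- ===== PORT A =====

-- '#' + '#'.join(s) + '#'
def pvTransA (l : List Char) : List Char := '#' :: l.flatMap (fun c => [c, '#'])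

-- the inner `while` of manacher: expand p[i] while the mirrored characters match
def pvExpandA (t : List Char) (i : Nat) (k : Nat) : Nat :=
  if h : k + 1 ≤ i ∧ i + k + 1 < t.length ∧ t[i - k - 1]? = t[i + k + 1]? then
    pvExpandA t i (k + 1)
  else k
termination_by t.length - (i + k)
decreasing_by omega

-- one iteration of manacher's `for i in range(2n+1)` loop; state = (p, center, right)
def pvManStep (t : List Char) (st : List Nat × Nat × Nat) (i : Nat) : List Nat × Nat × Nat :=
  let p := st.1
  let center := st.2.1
  let right := st.2.2
  let p1 := if i < right then p.set i (min (right - i) (p.getD (2 * center - i) 0)) else p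
  let k := pvExpandA t i (p1.getD i 0)
  let p2 := p1.set i k
  if right < i + k then (p2, i, i + k) else (p2, center, right)

def pvManacher (l : List Char) : List Nat :=
  let n := l.length
  let t := pvTransA l
  ((List.range (2 * n + 1)).foldl (pvManStep t) (List.replicate (2 * n + 1) 0, 0, 0)).1

def max_product_of_palindromic_substrings (s : String) : Int :=
  let l := s.toList
  let n := l.length
  let p := pvManacher l
  let mll := (List.range n).foldl
    (fun acc i =>
      acc.set i (if 0 < i then max (acc.getD (i - 1) 0) (p.getD (2 * i + 1) 0) else p.getD 1 0))
    (List.replicate n 0)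
  let mlr := ((List.range n).reverse).foldl
    (fun acc i =>
      acc.set i (if i < n - 1 then max (acc.getD (i + 1) 0) (p.getD (2 * i + 1) 0)
                 else p.getD (2 * n - 1) 0))
    (List.replicate n 0)
  let mp := (List.range (n - 1)).foldl
    (fun mp i => max mp (mll.getD i 0 * mlr.getD (i + 1) 0)) 0
  Int.ofNat mp

-- ===== PORT B =====

-- the `while` of odd_len: expand (l, r) outward while s[l-1] == s[r+1]
def pvOddLen (l : List Char) (a b : Nat) : Nat :=
  if h : 1 ≤ a ∧ b + 1 < l.length ∧ l[a - 1]? = l[b + 1]? then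
    pvOddLen l (a - 1) (b + 1)
  else b - a + 1
termination_by l.length - b
decreasing_by omega

def max_product_of_palindromic_substrings_alt (s : String) : Int :=
  let l := s.toList
  let n := l.length
  let lens := (List.range n).map (fun i => pvOddLen l i i)
  let suf := ((List.range n).reverse).foldl
    (fun acc i => acc.set i (max (lens.getD i 0) (acc.getD (i + 1) 0)))
    (List.replicate (n + 1) 0)
  let res := (List.range (n - 1)).foldl
    (fun st i =>
      let pr := max st.1 (lens.getD i 0)
      (pr, max st.2 (pr * suf.getD (i + 1) 0)))
    ((0, 0) : Nat × Nat)
  Int.ofNat res.2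

-- ===== PRECONDITION & SPEC =====
def Spec_max_product_of_palindromic_substrings (s : String) (out : Int) : Prop := out = max_product_of_palindromic_substrings_alt s
instance (s : String) (out : Int) : Decidable (Spec_max_product_of_palindromic_substrings s out) := by unfold Spec_max_product_of_palindromic_substrings; infer_instance

-- ===== CLAIM (what is proved, stated in full; the proofs are below) =====
def Claim_equal_max_product_of_palindromic_substrings : Prop := ∀ (s : String), Dom_max_product_of_palindromic_substrings s → Spec_max_product_of_palindromic_substrings s (max_product_of_palindromic_substrings s)

-- ===== LEMMAS AND PROOFS =====

-- `pvValid xs i k`: offset k is a valid palindrome radius around center i in xs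
def pvValid (xs : List Char) (i k : Nat) : Prop :=
  k ≤ i ∧ i + k < xs.length ∧ ∀ j, j ≤ k → xs[i - j]? = xs[i + j]?

-- `pvStep xs i k`: the expansion loops' guard (radius can grow past k)
def pvStep (xs : List Char) (i k : Nat) : Prop :=
  k + 1 ≤ i ∧ i + k + 1 < xs.length ∧ xs[i - k - 1]? = xs[i + k + 1]?

theorem pvValid_zero (xs : List Char) (i : Nat) (hi : i < xs.length) : pvValid xs i 0 :=
  ⟨Nat.zero_le i, by omega, fun j hj => by simp [Nat.le_zero.mp hj]⟩

theorem pvValid_succ (xs : List Char) (i k : Nat) (hv : pvValid xs i k) (hs : pvStep xs i k) :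
    pvValid xs i (k + 1) := by
  obtain ⟨h1, h2, h3⟩ := hv
  obtain ⟨s1, s2, s3⟩ := hs
  refine ⟨s1, by omega, fun j hj => ?_⟩
  rcases Nat.lt_or_ge j (k + 1) with h | h
  · exact h3 j (by omega)
  · have hj' : j = k + 1 := by omega
    subst hj'
    have e1 : i - (k + 1) = i - k - 1 := by omega
    have e2 : i + (k + 1) = i + k + 1 := by omega
    rw [e1, e2]; exact s3

theorem pvValid_unique (xs : List Char) (i a b : Nat)
    (ha : pvValid xs i a) (hna : ¬ pvStep xs i a)
    (hb : pvValid xs i b) (hnb : ¬ pvStep xs i b) : a = b := by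
  obtain ⟨ha1, ha2, ha3⟩ := ha
  obtain ⟨hb1, hb2, hb3⟩ := hb
  rcases Nat.lt_trichotomy a b with h | h | h
  · exfalso; apply hna
    refine ⟨by omega, by omega, ?_⟩
    have := hb3 (a + 1) (by omega)
    have e1 : i - (a + 1) = i - a - 1 := by omega
    have e2 : i + (a + 1) = i + a + 1 := by omega
    rw [e1, e2] at this; exact this
  · exact h
  · exfalso; apply hnb
    refine ⟨by omega, by omega, ?_⟩
    have := ha3 (b + 1) (by omega)
    have e1 : i - (b + 1) = i - b - 1 := by omega
    have e2 : i + (b + 1) = i + b + 1 := by omega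
    rw [e1, e2] at this; exact this

-- palindrome symmetry around center c, phrased additively so `omega` can drive it
theorem pvValid_sym (xs : List Char) (c k : Nat) (h : pvValid xs c k) :
    ∀ a b, a + b = 2 * c → c ≤ b → b ≤ c + k → xs[a]? = xs[b]? := by
  intro a b hab h1 h2
  have hk := h.1
  have := h.2.2 (b - c) (by omega)
  have e1 : c - (b - c) = a := by omega
  have e2 : c + (b - c) = b := by omega
  rw [e1, e2] at this; exact this

-- the inner while loop of A ends at the (unique) maximal valid radius
theorem pvExpandA_spec (t : List Char) (i : Nat) :
    ∀ d k, t.length - (i + k) ≤ d → pvValid t i k →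
      pvValid t i (pvExpandA t i k) ∧ ¬ pvStep t i (pvExpandA t i k) := by
  intro d
  induction d with
  | zero =>
    intro k hd hv
    rw [pvExpandA]
    split
    · rename_i hc; exfalso; omega
    · rename_i hc; exact ⟨hv, fun hs => hc ⟨hs.1, hs.2.1, hs.2.2⟩⟩
  | succ d ih =>
    intro k hd hv
    rw [pvExpandA]
    split
    · rename_i hc
      exact ih (k + 1) (by omega) (pvValid_succ t i k hv ⟨hc.1, hc.2.1, hc.2.2⟩)
    · rename_i hc; exact ⟨hv, fun hs => hc ⟨hs.1, hs.2.1, hs.2.2⟩⟩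

theorem pvExpandA_spec' (t : List Char) (i k : Nat) (hv : pvValid t i k) :
    pvValid t i (pvExpandA t i k) ∧ ¬ pvStep t i (pvExpandA t i k) :=
  pvExpandA_spec t i (t.length - (i + k)) k le_rfl hv

theorem pvExpandA_eq_zero_start (t : List Char) (i k : Nat) (hv : pvValid t i k) :
    pvExpandA t i k = pvExpandA t i 0 := by
  have h1 := pvExpandA_spec' t i k hv
  have h2 := pvExpandA_spec' t i 0 (pvValid_zero t i (by have := hv.2.1; omega))
  exact pvValid_unique t i _ _ h1.1 h1.2 h2.1 h2.2

-- ---- the transformed string '#' + '#'.join(s) + '#' ----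

theorem pvTransA_length (l : List Char) : (pvTransA l).length = 2 * l.length + 1 := by
  induction l with
  | nil => rfl
  | cons c cs ih =>
    have h : pvTransA (c :: cs) = '#' :: c :: pvTransA cs := rfl
    rw [h]; simp only [List.length_cons, ih]; omega

theorem pvTransA_get (l : List Char) (x : Nat) :
    (pvTransA l)[x]? =
      if x % 2 = 0 then (if x < 2 * l.length + 1 then some '#' else none) else l[x / 2]? := by
  induction l generalizing x with
  | nil =>
    match x with
    | 0 => rfl
    | 1 => rfl
    | (x + 2) => simp [pvTransA]
  | cons c cs ih =>
    have hrw : pvTransA (c :: cs) = '#' :: c :: pvTransA cs := rfl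
    match x with
    | 0 => rw [hrw]; simp
    | 1 => rw [hrw]; simp
    | (x + 2) =>
      rw [hrw]
      have lhs : ('#' :: c :: pvTransA cs)[x + 2]? = (pvTransA cs)[x]? := by simp
      rw [lhs, ih x]
      have hm : (x + 2) % 2 = x % 2 := by omega
      have hd : (x + 2) / 2 = x / 2 + 1 := by omega
      rw [hm, hd]
      by_cases hp : x % 2 = 0
      · simp only [hp, if_true]
        have hiff : (x < 2 * cs.length + 1) ↔ (x + 2 < 2 * (c :: cs).length + 1) := by
          simp [List.length_cons]; omega
        by_cases hb : x < 2 * cs.length + 1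
        · rw [if_pos hb, if_pos (hiff.mp hb)]
        · rw [if_neg hb, if_neg (fun hh => hb (hiff.mpr hh))]
      · simp only [hp, if_false]
        simp

-- ---- Manacher's mirror trick produces a valid starting radius ----

theorem pvMirror (t : List Char) (c i : Nat)
    (hc : pvValid t c (pvExpandA t c 0))
    (hm : pvValid t (2 * c - i) (pvExpandA t (2 * c - i) 0))
    (hci : c < i) (hir : i < c + pvExpandA t c 0) :
    pvValid t i (min (c + pvExpandA t c 0 - i) (pvExpandA t (2 * c - i) 0)) := by
  set rc := pvExpandA t c 0 with hrc
  set mir := 2 * c - i with hmir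
  set rm := pvExpandA t mir 0 with hrm
  have hrcc : rc ≤ c := hc.1
  have hlen : c + rc < t.length := hc.2.1
  have hrmm : rm ≤ mir := hm.1
  have hmlen : mir + rm < t.length := hm.2.1
  have him : i ≤ 2 * c := by omega
  set k := min (c + rc - i) rm with hk
  refine ⟨by omega, by omega, fun j hj => ?_⟩
  have hjrm : j ≤ rm := by omega
  have hjk : j ≤ c + rc - i := by omega
  have e1 : t[i + j]? = t[mir - j]? := by
    symm
    exact pvValid_sym t c rc hc (mir - j) (i + j) (by omega) (by omega) (by omega)
  have e2 : t[mir - j]? = t[mir + j]? := by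
    exact pvValid_sym t mir rm hm (mir - j) (mir + j) (by omega) (by omega) (by omega)
  have e3 : t[mir + j]? = t[i - j]? := by
    by_cases hcase : c ≤ mir + j
    · symm
      exact pvValid_sym t c rc hc (i - j) (mir + j) (by omega) hcase (by omega)
    · exact pvValid_sym t c rc hc (mir + j) (i - j) (by omega) (by omega) (by omega)
  calc t[i - j]? = t[mir + j]? := e3.symm
    _ = t[mir - j]? := e2.symm
    _ = t[i + j]? := e1.symm

-- ---- generic fold-with-invariant lemmas over range and reversed range ----

theorem pvFoldlRangeInv {A : Type} (step : A → Nat → A) (P : Nat → A → Prop) (n : Nat) (init : A)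
    (h0 : P 0 init) (hs : ∀ i st, i < n → P i st → P (i + 1) (step st i)) :
    P n ((List.range n).foldl step init) := by
  induction n with
  | zero => simpa using h0
  | succ n ih =>
    rw [List.range_succ, List.foldl_append]
    exact hs n _ (by omega) (ih (fun i st hi => hs i st (by omega)))

theorem pvFoldlRangeRevInv {A : Type} (step : A → Nat → A) (P : Nat → A → Prop) :
    ∀ (n : Nat) (init : A), P n init → (∀ k st, k < n → P (k + 1) st → P k (step st k)) →
    P 0 (((List.range n).reverse).foldl step init) := by
  intro n
  induction n with
  | zero => intro init h0 _; simpa using h0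
  | succ n ih =>
    intro init h0 hs
    have hrev : (List.range (n + 1)).reverse = n :: (List.range n).reverse := by
      rw [List.range_succ, List.reverse_append]; simp
    rw [hrev, List.foldl_cons]
    exact ih (step init n) (hs n init (by omega) h0) (fun k st hk => hs k st (by omega))

-- ---- tiny getD facts used for the array-style folds ----

theorem pvGetD_set_self (l : List Nat) (i v : Nat) (h : i < l.length) :
    (l.set i v).getD i 0 = v := by
  simp [List.getD, h]

theorem pvGetD_set_ne (l : List Nat) (i j v : Nat) (h : i ≠ j) :
    (l.set i v).getD j 0 = l.getD j 0 := by
  simp [List.getD, List.getElem?_set_ne, h]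

theorem pvGetD_replicate (n i : Nat) : (List.replicate n (0 : Nat)).getD i 0 = 0 := by
  simp [List.getD]

-- ---- the Manacher loop invariant: every processed entry is the maximal radius ----

def pvInvM (t : List Char) (i : Nat) (st : List Nat × Nat × Nat) : Prop :=
  st.1.length = t.length ∧
  (∀ j, j < i → st.1.getD j 0 = pvExpandA t j 0) ∧
  (∀ j, i ≤ j → st.1.getD j 0 = 0) ∧
  (st.2.1 < i ∨ (st.2.1 = 0 ∧ st.2.2 = 0)) ∧
  st.2.2 = st.2.1 + pvExpandA t st.2.1 0

theorem pvExpandA_zero_zero (t : List Char) : pvExpandA t 0 0 = 0 := by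
  rw [pvExpandA]
  split
  · rename_i h; exfalso; omega
  · rfl

theorem pvManStep_inv (t : List Char) (i : Nat) (st : List Nat × Nat × Nat)
    (hi : i < t.length) (h : pvInvM t i st) : pvInvM t (i + 1) (pvManStep t st i) := by
  obtain ⟨p, c, r⟩ := st
  obtain ⟨hlen, hlt, hge, hcd, hr⟩ := h
  dsimp only at hlen hlt hge hcd hr
  simp only [pvManStep]
  set p1 := if i < r then p.set i (min (r - i) (p.getD (2 * c - i) 0)) else p with hp1
  have hp1len : p1.length = t.length := by
    rw [hp1]; split <;> simp [hlen]
  have hp1lt : ∀ j, j < i → p1.getD j 0 = pvExpandA t j 0 := by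
    intro j hj; rw [hp1]; split
    · rw [pvGetD_set_ne p i j _ (by omega)]; exact hlt j hj
    · exact hlt j hj
  have hp1gt : ∀ j, i < j → p1.getD j 0 = 0 := by
    intro j hj; rw [hp1]; split
    · rw [pvGetD_set_ne p i j _ (by omega)]; exact hge j (by omega)
    · exact hge j (by omega)
  have hk0 : pvValid t i (p1.getD i 0) := by
    rw [hp1]; split
    · rename_i hir
      have hci : c < i := by
        rcases hcd with h' | ⟨h1, h2⟩
        · exact h'
        · omega
      rw [pvGetD_set_self p i _ (by omega)]
      have hcv := (pvExpandA_spec' t c 0 (pvValid_zero t c (by omega))).1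
      have hcle := hcv.1
      have hclen := hcv.2.1
      have hmlt : 2 * c - i < i := by omega
      rw [hlt (2 * c - i) hmlt]
      have hmv := (pvExpandA_spec' t (2 * c - i) 0
        (pvValid_zero t (2 * c - i) (by omega))).1
      have hmain := pvMirror t c i hcv hmv hci (by omega)
      have herw : r - i = c + pvExpandA t c 0 - i := by omega
      rw [herw]; exact hmain
    · rw [hge i le_rfl]; exact pvValid_zero t i hi
  have hkeq : pvExpandA t i (p1.getD i 0) = pvExpandA t i 0 :=
    pvExpandA_eq_zero_start t i _ hk0
  set k := pvExpandA t i (p1.getD i 0) with hkdef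
  have hplen2 : (p1.set i k).length = t.length := by simp [hp1len]
  have hplt2 : ∀ j, j < i + 1 → (p1.set i k).getD j 0 = pvExpandA t j 0 := by
    intro j hj
    rcases Nat.lt_or_ge j i with hji | hji
    · rw [pvGetD_set_ne p1 i j _ (by omega)]; exact hp1lt j hji
    · have hji' : j = i := by omega
      subst hji'
      rw [pvGetD_set_self p1 j _ (by omega)]; exact hkeq
  have hpgt2 : ∀ j, i + 1 ≤ j → (p1.set i k).getD j 0 = 0 := by
    intro j hj
    rw [pvGetD_set_ne p1 i j _ (by omega)]; exact hp1gt j (by omega)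
  split
  · exact ⟨hplen2, hplt2, hpgt2, Or.inl (by show i < i + 1; omega),
      by show i + k = i + pvExpandA t i 0; rw [hkeq]⟩
  · refine ⟨hplen2, hplt2, hpgt2, ?_, hr⟩
    rcases hcd with h' | h'
    · exact Or.inl (by show c < i + 1; omega)
    · exact Or.inr h'

theorem pvManacher_getD (l : List Char) (j : Nat) (hj : j < 2 * l.length + 1) :
    (pvManacher l).getD j 0 = pvExpandA (pvTransA l) j 0 := by
  have hlt : (pvTransA l).length = 2 * l.length + 1 := pvTransA_length l
  have h0 : pvInvM (pvTransA l) 0 (List.replicate (2 * l.length + 1) 0, 0, 0) := by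
    refine ⟨by simp [hlt], fun j hj => by omega, fun j _ => pvGetD_replicate _ j,
      Or.inr ⟨rfl, rfl⟩, ?_⟩
    show (0 : Nat) = 0 + pvExpandA (pvTransA l) 0 0
    rw [pvExpandA_zero_zero]
  have hfin := pvFoldlRangeInv (pvManStep (pvTransA l)) (pvInvM (pvTransA l)) (2 * l.length + 1)
    (List.replicate (2 * l.length + 1) 0, 0, 0) h0
    (fun i st hi hst => pvManStep_inv (pvTransA l) i st (by omega) hst)
  exact (hfin.2.1) j hj

-- ---- B's expand-around-center equals the maximal odd radius ----

theorem pvOddLen_spec (l : List Char) (i : Nat) :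
    ∀ d u, l.length - (i + u) ≤ d → pvValid l i u →
      ∃ v, pvOddLen l (i - u) (i + u) = 2 * v + 1 ∧ pvValid l i v ∧ ¬ pvStep l i v := by
  intro d
  induction d with
  | zero =>
    intro u hd hv
    exfalso; have := hv.2.1; omega
  | succ d ih =>
    intro u hd hv
    have hui : u ≤ i := hv.1
    rw [pvOddLen]
    have hcond : (1 ≤ i - u ∧ i + u + 1 < l.length ∧ l[i - u - 1]? = l[i + u + 1]?) ↔
        pvStep l i u := by
      unfold pvStep
      constructor
      · rintro ⟨h1, h2, h3⟩; exact ⟨by omega, h2, h3⟩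
      · rintro ⟨h1, h2, h3⟩; exact ⟨by omega, h2, h3⟩
    split
    · rename_i hc
      have hs : pvStep l i u := hcond.mp ⟨hc.1, hc.2.1, hc.2.2⟩
      have hv' : pvValid l i (u + 1) := pvValid_succ l i u hv hs
      have e1 : i - u - 1 = i - (u + 1) := by omega
      have e2 : i + u + 1 = i + (u + 1) := by omega
      rw [e1, e2]
      exact ih (u + 1) (by omega) hv'
    · rename_i hc
      refine ⟨u, by omega, hv, fun hs => hc (hcond.mpr hs)⟩

-- valid/step on the original string correspond to valid/step at odd centers of t

theorem pvCorrValid (l : List Char) (i u : Nat) (h : pvValid l i u) :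
    pvValid (pvTransA l) (2 * i + 1) (2 * u + 1) := by
  obtain ⟨h1, h2, h3⟩ := h
  have hlt := pvTransA_length l
  refine ⟨by omega, by omega, fun j hj => ?_⟩
  obtain ⟨w, hw | hw⟩ := Nat.even_or_odd' j
  · subst hw
    have hwu : w ≤ u := by omega
    have e1 : 2 * i + 1 - 2 * w = 2 * (i - w) + 1 := by omega
    have e2 : 2 * i + 1 + 2 * w = 2 * (i + w) + 1 := by omega
    rw [e1, e2, pvTransA_get, pvTransA_get]
    have m1 : (2 * (i - w) + 1) % 2 = 1 := by omega
    have m2 : (2 * (i + w) + 1) % 2 = 1 := by omega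
    have d1 : (2 * (i - w) + 1) / 2 = i - w := by omega
    have d2 : (2 * (i + w) + 1) / 2 = i + w := by omega
    rw [m1, m2, d1, d2]
    simp only [if_neg (by omega : ¬ (1 : Nat) = 0)]
    exact h3 w hwu
  · subst hw
    have e1 : 2 * i + 1 - (2 * w + 1) = 2 * (i - w) := by omega
    have e2 : 2 * i + 1 + (2 * w + 1) = 2 * (i + w + 1) := by omega
    rw [e1, e2, pvTransA_get, pvTransA_get]
    have m1 : (2 * (i - w)) % 2 = 0 := by omega
    have m2 : (2 * (i + w + 1)) % 2 = 0 := by omega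
    rw [m1, m2]
    have b1 : 2 * (i - w) < 2 * l.length + 1 := by omega
    have b2 : 2 * (i + w + 1) < 2 * l.length + 1 := by omega
    simp [b1, b2]

theorem pvCorrStep (l : List Char) (i u : Nat) (_hu : u ≤ i) (hn : i + u < l.length) :
    pvStep (pvTransA l) (2 * i + 1) (2 * u + 1) ↔ pvStep l i u := by
  have hlt := pvTransA_length l
  unfold pvStep
  constructor
  · rintro ⟨h1, h2, h3⟩
    refine ⟨by omega, by omega, ?_⟩
    have f1 : 2 * i + 1 - (2 * u + 1) - 1 = 2 * (i - u - 1) + 1 := by omega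
    have f2 : 2 * i + 1 + (2 * u + 1) + 1 = 2 * (i + u + 1) + 1 := by omega
    rw [f1, f2, pvTransA_get, pvTransA_get] at h3
    have m1 : (2 * (i - u - 1) + 1) % 2 = 1 := by omega
    have m2 : (2 * (i + u + 1) + 1) % 2 = 1 := by omega
    have d1 : (2 * (i - u - 1) + 1) / 2 = i - u - 1 := by omega
    have d2 : (2 * (i + u + 1) + 1) / 2 = i + u + 1 := by omega
    rw [m1, m2, d1, d2] at h3
    simp only [if_neg (by omega : ¬ (1 : Nat) = 0)] at h3
    exact h3
  · rintro ⟨h1, h2, h3⟩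
    refine ⟨by omega, by omega, ?_⟩
    have f1 : 2 * i + 1 - (2 * u + 1) - 1 = 2 * (i - u - 1) + 1 := by omega
    have f2 : 2 * i + 1 + (2 * u + 1) + 1 = 2 * (i + u + 1) + 1 := by omega
    rw [f1, f2, pvTransA_get, pvTransA_get]
    have m1 : (2 * (i - u - 1) + 1) % 2 = 1 := by omega
    have m2 : (2 * (i + u + 1) + 1) % 2 = 1 := by omega
    have d1 : (2 * (i - u - 1) + 1) / 2 = i - u - 1 := by omega
    have d2 : (2 * (i + u + 1) + 1) / 2 = i + u + 1 := by omega
    rw [m1, m2, d1, d2]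
    simp only [if_neg (by omega : ¬ (1 : Nat) = 0)]
    exact h3

theorem pvOddLen_eq_radT (l : List Char) (i : Nat) (hi : i < l.length) :
    pvOddLen l i i = pvExpandA (pvTransA l) (2 * i + 1) 0 := by
  obtain ⟨v, he, hv, hns⟩ :=
    pvOddLen_spec l i (l.length - i) 0 (by omega) (pvValid_zero l i hi)
  simp only [Nat.sub_zero, Nat.add_zero] at he
  have hlt := pvTransA_length l
  have hTv : pvValid (pvTransA l) (2 * i + 1) (2 * v + 1) := pvCorrValid l i v hv
  have hTns : ¬ pvStep (pvTransA l) (2 * i + 1) (2 * v + 1) := by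
    intro hs; exact hns ((pvCorrStep l i v hv.1 hv.2.1).mp hs)
  have hr := pvExpandA_spec' (pvTransA l) (2 * i + 1) 0
    (pvValid_zero (pvTransA l) (2 * i + 1) (by omega))
  rw [he]
  exact pvValid_unique (pvTransA l) (2 * i + 1) (2 * v + 1) _ hTv hTns hr.1 hr.2

-- ---- prefix / suffix maxima and the characterisations of the array folds ----

def pvPmax (f : Nat → Nat) : Nat → Nat
  | 0 => f 0
  | i + 1 => max (pvPmax f i) (f (i + 1))

def pvSmax (f : Nat → Nat) (n i : Nat) : Nat :=
  if i + 1 < n then max (f i) (pvSmax f n (i + 1)) else f i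
termination_by n - i

theorem pvPmax_congr (f g : Nat → Nat) (i : Nat) (h : ∀ j, j ≤ i → f j = g j) :
    pvPmax f i = pvPmax g i := by
  induction i with
  | zero => simp [pvPmax, h 0 le_rfl]
  | succ i ih =>
    simp only [pvPmax]
    rw [ih (fun j hj => h j (by omega)), h (i + 1) le_rfl]

theorem pvSmax_congr (f g : Nat → Nat) (n : Nat) :
    ∀ d i, n - i ≤ d → i < n → (∀ j, i ≤ j → j < n → f j = g j) →
      pvSmax f n i = pvSmax g n i := by
  intro d
  induction d with
  | zero => intro i hd hin h; omega
  | succ d ih =>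
    intro i hd hin h
    rw [pvSmax]
    conv_rhs => rw [pvSmax]
    by_cases hc : i + 1 < n
    · rw [if_pos hc, if_pos hc, h i le_rfl hin,
        ih (i + 1) (by omega) (by omega) (fun j hj1 hj2 => h j (by omega) hj2)]
    · rw [if_neg hc, if_neg hc]
      exact h i le_rfl hin

-- mll characterisation: A's prefix-max array
theorem pvMllChar (p : List Nat) (n : Nat) :
    ∀ i, i < n →
      ((List.range n).foldl
        (fun acc i =>
          acc.set i (if 0 < i then max (acc.getD (i - 1) 0) (p.getD (2 * i + 1) 0)
                     else p.getD 1 0))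
        (List.replicate n 0)).getD i 0 = pvPmax (fun j => p.getD (2 * j + 1) 0) i := by
  have hstep : ∀ i arr, i < n →
      (arr.length = n ∧
        (∀ j, j < i → List.getD arr j 0 = pvPmax (fun j => p.getD (2 * j + 1) 0) j) ∧
        (∀ j, i ≤ j → List.getD arr j 0 = 0)) →
      ((arr.set i (if 0 < i then max (arr.getD (i - 1) 0) (p.getD (2 * i + 1) 0)
                   else p.getD 1 0)).length = n ∧
        (∀ j, j < i + 1 → List.getD (arr.set i (if 0 < i then max (arr.getD (i - 1) 0) (p.getD (2 * i + 1) 0) else p.getD 1 0)) j 0 = pvPmax (fun j => p.getD (2 * j + 1) 0) j) ∧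
        (∀ j, i + 1 ≤ j → List.getD (arr.set i (if 0 < i then max (arr.getD (i - 1) 0) (p.getD (2 * i + 1) 0) else p.getD 1 0)) j 0 = 0)) := by
    rintro i arr hi ⟨hlen, hlo, hhi⟩
    refine ⟨by simp [hlen], ?_, ?_⟩
    · intro j hj
      rcases Nat.lt_or_ge j i with hji | hji
      · rw [pvGetD_set_ne arr i j _ (by omega)]; exact hlo j hji
      · have hje : j = i := by omega
        subst hje
        rw [pvGetD_set_self arr j _ (by omega)]
        by_cases h0 : 0 < j
        · obtain ⟨j', rfl⟩ : ∃ j', j = j' + 1 := ⟨j - 1, by omega⟩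
          rw [if_pos h0]
          simp only [Nat.add_sub_cancel]
          rw [hlo j' (by omega)]
          simp [pvPmax]
        · have hje0 : j = 0 := by omega
          subst hje0
          rw [if_neg h0]
          simp [pvPmax]
    · intro j hj
      rw [pvGetD_set_ne arr i j _ (by omega)]; exact hhi j (by omega)
  have h := pvFoldlRangeInv
    (fun acc i =>
      acc.set i (if 0 < i then max (acc.getD (i - 1) 0) (p.getD (2 * i + 1) 0)
                 else p.getD 1 0))
    (fun k arr => arr.length = n ∧
      (∀ j, j < k → List.getD arr j 0 = pvPmax (fun j => p.getD (2 * j + 1) 0) j) ∧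
      (∀ j, k ≤ j → List.getD arr j 0 = 0))
    n (List.replicate n 0)
    ⟨by simp, fun j hj => by omega, fun j _ => pvGetD_replicate n j⟩
    hstep
  exact fun i hi => h.2.1 i hi

-- mlr characterisation: A's suffix-max array
theorem pvMlrChar (p : List Nat) (n : Nat) :
    ∀ i, i < n →
      (((List.range n).reverse).foldl
        (fun acc i =>
          acc.set i (if i < n - 1 then max (acc.getD (i + 1) 0) (p.getD (2 * i + 1) 0)
                     else p.getD (2 * n - 1) 0))
        (List.replicate n 0)).getD i 0 = pvSmax (fun j => p.getD (2 * j + 1) 0) n i := by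
  have h := pvFoldlRangeRevInv
    (fun acc i =>
      acc.set i (if i < n - 1 then max (acc.getD (i + 1) 0) (p.getD (2 * i + 1) 0)
                 else p.getD (2 * n - 1) 0))
    (fun k arr => arr.length = n ∧
      ∀ i, k ≤ i → i < n → List.getD arr i 0 = pvSmax (fun j => p.getD (2 * j + 1) 0) n i)
    n (List.replicate n 0)
    ⟨by simp, fun i hi hin => by omega⟩
    ?_
  · exact fun i hin => h.2 i (by omega) hin
  · rintro k arr hk ⟨hlen, hup⟩
    refine ⟨by simp [hlen], ?_⟩
    intro i hi hin
    rcases Nat.lt_or_ge k i with hki | hki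
    · rw [pvGetD_set_ne arr k i _ (by omega)]; exact hup i (by omega) hin
    · have hik : i = k := by omega
      subst hik
      rw [pvGetD_set_self arr i _ (by omega)]
      by_cases hc : i < n - 1
      · rw [if_pos hc, hup (i + 1) (by omega) (by omega)]
        conv_rhs => rw [pvSmax]
        rw [if_pos (show i + 1 < n by omega)]
        exact Nat.max_comm _ _
      · have hnc : ¬ (i + 1 < n) := by omega
        rw [if_neg hc]
        conv_rhs => rw [pvSmax]
        rw [if_neg hnc]
        have hie : 2 * n - 1 = 2 * i + 1 := by omega
        rw [hie]

-- suf characterisation: B's suffix-max array (length n+1, suf[n] = 0)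
theorem pvSufChar (lens : List Nat) (n : Nat) :
    ∀ i, i < n →
      (((List.range n).reverse).foldl
        (fun acc i => acc.set i (max (lens.getD i 0) (acc.getD (i + 1) 0)))
        (List.replicate (n + 1) 0)).getD i 0 = pvSmax (fun j => lens.getD j 0) n i := by
  have h := pvFoldlRangeRevInv
    (fun acc i => acc.set i (max (lens.getD i 0) (acc.getD (i + 1) 0)))
    (fun k arr => arr.length = n + 1 ∧
      (∀ i, k ≤ i → i < n → List.getD arr i 0 = pvSmax (fun j => lens.getD j 0) n i) ∧
      List.getD arr n 0 = 0)
    n (List.replicate (n + 1) 0)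
    ⟨by simp, fun i hi hin => by omega, pvGetD_replicate _ n⟩
    ?_
  · exact fun i hin => h.2.1 i (by omega) hin
  · rintro k arr hk ⟨hlen, hup, hn0⟩
    refine ⟨by simp [hlen], ?_, ?_⟩
    · intro i hi hin
      rcases Nat.lt_or_ge k i with hki | hki
      · rw [pvGetD_set_ne arr k i _ (by omega)]; exact hup i (by omega) hin
      · have hik : i = k := by omega
        subst hik
        rw [pvGetD_set_self arr i _ (by omega)]
        by_cases hc : i + 1 < n
        · rw [hup (i + 1) (by omega) hc]
          conv_rhs => rw [pvSmax]
          rw [if_pos hc]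
        · have hnc : ¬ (i + 1 < n) := by omega
          have hie : i + 1 = n := by omega
          rw [hie, hn0]
          conv_rhs => rw [pvSmax]
          rw [if_neg hnc]
          simp
    · rw [pvGetD_set_ne arr k n _ (by omega)]; exact hn0

-- B's fused loop: the pair (running prefix max, best) matches A's product fold
theorem pvStreamChar (g h : Nat → Nat) (k : Nat) :
    ((List.range k).foldl
      (fun st i => (max st.1 (g i), max st.2 (max st.1 (g i) * h (i + 1))))
      ((0, 0) : Nat × Nat)).1 = (if k = 0 then 0 else pvPmax g (k - 1)) ∧
    ((List.range k).foldl
      (fun st i => (max st.1 (g i), max st.2 (max st.1 (g i) * h (i + 1))))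
      ((0, 0) : Nat × Nat)).2 =
      (List.range k).foldl (fun mp i => max mp (pvPmax g i * h (i + 1))) 0 := by
  induction k with
  | zero => simp
  | succ k ih =>
    rw [List.range_succ, List.foldl_append, List.foldl_append]
    simp only [List.foldl_cons, List.foldl_nil]
    obtain ⟨ih1, ih2⟩ := ih
    have hpr : max ((List.range k).foldl
        (fun st i => (max st.1 (g i), max st.2 (max st.1 (g i) * h (i + 1))))
        ((0, 0) : Nat × Nat)).1 (g k) = pvPmax g k := by
      rw [ih1]
      by_cases hk : k = 0
      · subst hk; simp [pvPmax]
      · obtain ⟨k', rfl⟩ : ∃ k', k = k' + 1 := ⟨k - 1, by omega⟩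
        rw [if_neg hk]
        simp [pvPmax]
    refine ⟨?_, ?_⟩
    · rw [if_neg (by omega)]
      simpa using hpr
    · rw [ih2, hpr]

-- ---- assembling the two sides ----

theorem pvMainEq (s : String) :
    max_product_of_palindromic_substrings s = max_product_of_palindromic_substrings_alt s := by
  unfold max_product_of_palindromic_substrings max_product_of_palindromic_substrings_alt
  dsimp only
  congr 1
  set l := s.toList with hls
  set n := l.length with hn
  set p := pvManacher l with hp
  set lens := (List.range n).map (fun i => pvOddLen l i i) with hlens
  have hfg : ∀ j, j < n → p.getD (2 * j + 1) 0 = lens.getD j 0 := by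
    intro j hj
    rw [hp, pvManacher_getD l (2 * j + 1) (by omega)]
    rw [hlens, PySem.List.getD_map_range (fun i => pvOddLen l i i) n j 0 hj]
    exact (pvOddLen_eq_radT l j hj).symm
  have haveA : (List.range (n - 1)).foldl
      (fun mp i =>
        max mp
          (((List.range n).foldl
              (fun acc i =>
                acc.set i (if 0 < i then max (acc.getD (i - 1) 0) (p.getD (2 * i + 1) 0)
                           else p.getD 1 0))
              (List.replicate n 0)).getD i 0 *
            (((List.range n).reverse).foldl
              (fun acc i =>
                acc.set i (if i < n - 1 then max (acc.getD (i + 1) 0) (p.getD (2 * i + 1) 0)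
                           else p.getD (2 * n - 1) 0))
              (List.replicate n 0)).getD (i + 1) 0)) 0 =
      (List.range (n - 1)).foldl
        (fun mp i =>
          max mp (pvPmax (fun j => lens.getD j 0) i *
            pvSmax (fun j => lens.getD j 0) n (i + 1))) 0 := by
    apply List.foldl_ext
    intro mp i hi
    have hi' : i < n - 1 := List.mem_range.mp hi
    rw [pvMllChar p n i (by omega), pvMlrChar p n (i + 1) (by omega)]
    rw [pvPmax_congr (fun j => p.getD (2 * j + 1) 0) (fun j => lens.getD j 0) i
        (fun j hj => hfg j (by omega)),
      pvSmax_congr (fun j => p.getD (2 * j + 1) 0) (fun j => lens.getD j 0) n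
        (n - (i + 1)) (i + 1) le_rfl (by omega) (fun j hj1 hj2 => hfg j hj2)]
  have haveB0 : (List.range (n - 1)).foldl
      (fun st i =>
        (max st.1 (lens.getD i 0),
          max st.2 (max st.1 (lens.getD i 0) *
            (((List.range n).reverse).foldl
              (fun acc i => acc.set i (max (lens.getD i 0) (acc.getD (i + 1) 0)))
              (List.replicate (n + 1) 0)).getD (i + 1) 0)))
      ((0, 0) : Nat × Nat) =
      (List.range (n - 1)).foldl
        (fun st i =>
          (max st.1 (lens.getD i 0),
            max st.2 (max st.1 (lens.getD i 0) * pvSmax (fun j => lens.getD j 0) n (i + 1))))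
        ((0, 0) : Nat × Nat) := by
    apply List.foldl_ext
    intro st i hi
    have hi' : i < n - 1 := List.mem_range.mp hi
    rw [pvSufChar lens n (i + 1) (by omega)]
  have haveB1 := (pvStreamChar (fun j => lens.getD j 0)
    (pvSmax (fun j => lens.getD j 0) n) (n - 1)).2
  calc _ = (List.range (n - 1)).foldl
        (fun mp i =>
          max mp (pvPmax (fun j => lens.getD j 0) i *
            pvSmax (fun j => lens.getD j 0) n (i + 1))) 0 := haveA
    _ = _ := by rw [← haveB1, ← haveB0]

-- ===== VERDICT (by name: the statement is the Claim_ definition above) =====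
theorem max_product_of_palindromic_substrings_spec : Claim_equal_max_product_of_palindromic_substrings := by
  intro s _
  show _ = _
  exact pvMainEq s
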